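-- pv_equiv track=rewrite | github.com/KingFuRong/pythonSpider | 逆向百例/京东h5st_5_1_2.py | get_key_salt
-- ===== SOURCE A (Python) =====
-- MULTIPLIER = 8
--
-- SEGMENTS = 11
--
-- RESIDUAL = 64
--
-- TABLE = "VUTSRQPONMLKJIHGFEDCBA-_9876543210zyxwvutsrqponmlkjihgfedcbaZYXW"
--
-- def get_key_salt(key):
--     salt_map = TABLE
--     tk_len = len(key)
--     tk_slice = int(tk_len / SEGMENTS)
--     tk_salt = str()
--     salt_index = 0
--
--     for index in range(0, SEGMENTS):
--         if index == SEGMENTS - 1: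
--             for slice_index in range(0, tk_slice + tk_len % SEGMENTS):
--                 if index * tk_slice + slice_index < tk_len:
--                     salt_index += ord(key[index * tk_slice + slice_index])
--         else:
--             for slice_index in range(0, tk_slice):
--                 if index * tk_slice + slice_index < tk_len:
--                     salt_index += ord(key[index * tk_slice + slice_index])
--         salt_index *= MULTIPLIER
--         salt_index %= RESIDUAL
--         tk_salt += salt_map[salt_index]
--         salt_index = 0
--
--     return tk_salt
-- ===== SOURCE B (Python) =====
-- TABLE = "VUTSRQPONMLKJIHGFEDCBA-_9876543210zyxwvutsrqponmlkjihgfedcbaZYXW"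
-- REDUCED = TABLE[::8]  # sum*8 % 64 depends only on sum % 8, so an 8-char table suffices
--
-- def get_key_salt(key):
--     s = len(key) // 11
--     sums = [0] * 11
--     for pos, ch in enumerate(key):
--         sums[min(pos // s, 10) if s else 10] += ord(ch)
--     return "".join(REDUCED[v % 8] for v in sums)
-- ===== Notes on version B (the rewrite author's own statement) =====
-- stated objective: alternative
-- what changed: Instead of A's 11 per-segment scans with an inner guarded index loop, B makes one enumerate pass over the key, routing each character's code into its segment bucket by index arithmetic (pos//slice clamped to 10), and exploits sum*8 % 64 == (sum % 8)*8 to index an 8-character reduced table TABLE[::8] instead of the 64-character one.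
import Mathlib
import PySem

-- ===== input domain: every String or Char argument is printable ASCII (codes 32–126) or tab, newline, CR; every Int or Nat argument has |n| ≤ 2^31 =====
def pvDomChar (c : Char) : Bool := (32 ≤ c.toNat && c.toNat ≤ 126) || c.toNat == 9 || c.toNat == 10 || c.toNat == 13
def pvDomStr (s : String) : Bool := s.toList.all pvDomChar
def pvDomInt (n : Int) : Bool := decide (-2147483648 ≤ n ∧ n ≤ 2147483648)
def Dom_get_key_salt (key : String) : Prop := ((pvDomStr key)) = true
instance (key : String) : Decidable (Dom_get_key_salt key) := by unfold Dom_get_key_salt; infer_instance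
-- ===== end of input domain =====

-- B makes one pass over the key, assigning each character's code to its segment bucket by index
-- arithmetic, and observes that sum*8 % 64 depends only on sum % 8, so an 8-char reduced table
-- TABLE[::8] replaces the 64-char one (objective: alternative single-pass algorithm).

-- module-level constant TABLE (shared by both ports)
def pvTABLE : List Char := "VUTSRQPONMLKJIHGFEDCBA-_9876543210zyxwvutsrqponmlkjihgfedcbaZYXW".toList

-- ===== PORT A =====
-- 'int(tk_len / SEGMENTS)' is float division then truncation; ported as floor division,
-- exact for every string length below 2^52.
def get_key_salt (key : String) : String :=
  let salt_map := pvTABLE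
  let cs := key.toList
  let tk_len : Int := cs.length
  let tk_slice : Int := PySem.Int.floordiv tk_len 11
  let step : List Char × Int → Int → List Char × Int := fun st index =>
    let salt_index :=
      if index = 11 - 1 then
        (PySem.List.pyRange 0 (tk_slice + PySem.Int.mod tk_len 11) 1).foldl
          (fun acc slice_index =>
            if index * tk_slice + slice_index < tk_len then
              acc + ((PySem.List.pyGetD cs (index * tk_slice + slice_index) ' ').toNat : Int)
            else acc) st.2
      else
        (PySem.List.pyRange 0 tk_slice 1).foldl
          (fun acc slice_index =>
            if index * tk_slice + slice_index < tk_len then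
              acc + ((PySem.List.pyGetD cs (index * tk_slice + slice_index) ' ').toNat : Int)
            else acc) st.2
    let salt_index := PySem.Int.mod (salt_index * 8) 64
    (st.1 ++ [PySem.List.pyGetD salt_map salt_index ' '], 0)
  let res := (PySem.List.pyRange 0 11 1).foldl step (("".toList), 0)
  String.ofList res.1

-- ===== PORT B =====
-- REDUCED = TABLE[::8]
def pvREDUCED : List Char := (PySem.List.slice? pvTABLE none none 8).getD []

-- the loop body: sums[min(pos // s, 10) if s else 10] += ord(ch)
def pvStep (s : Nat) (sums : List Nat) (p : Char × Nat) : List Nat :=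
  let b := if s = 0 then 10 else min (p.2 / s) 10
  sums.set b (sums.getD b 0 + p.1.toNat)

def get_key_salt_alt (key : String) : String :=
  let cs := key.toList
  let s := cs.length / 11
  let sums := cs.zipIdx.foldl (pvStep s) (List.replicate 11 0)
  String.ofList (sums.map (fun v => pvREDUCED.getD (v % 8) ' '))

-- ===== PRECONDITION & SPEC =====
def Spec_get_key_salt (key : String) (out : String) : Prop := out = get_key_salt_alt key
instance (key : String) (out : String) : Decidable (Spec_get_key_salt key out) := by unfold Spec_get_key_salt; infer_instance

-- ===== CLAIM (what is proved, stated in full; the proofs are below) =====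
def Claim_equal_get_key_salt : Prop := ∀ (key : String), Dom_get_key_salt key → Spec_get_key_salt key (get_key_salt key)

-- ===== LEMMAS AND PROOFS =====

-- A's guarded inner loop over range(0, c) starting at offset a is the ord-sum of the segment.
lemma pvSegSum (cs : List Char) (a : Nat) (c : Nat) (acc : Int) :
    (PySem.List.pyRange 0 (c : Int) 1).foldl
      (fun acc j => if (a : Int) + j < (cs.length : Int) then
          acc + ((PySem.List.pyGetD cs ((a : Int) + j) ' ').toNat : Int) else acc) acc
    = acc + (((cs.drop a).take c).map (fun ch => (ch.toNat : Int))).sum := by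
  induction c generalizing acc with
  | zero => simp [PySem.List.pyRange_one_eq_nil]
  | succ c ih =>
    have hc : ((c + 1 : Nat) : Int) = (c : Int) + 1 := by push_cast; ring
    rw [hc, PySem.List.pyRange_one_succ_right (by positivity), List.foldl_append, ih]
    simp only [List.foldl_cons, List.foldl_nil]
    by_cases h : (a : Int) + (c : Int) < (cs.length : Int)
    · have hlt : a + c < cs.length := by exact_mod_cast h
      rw [if_pos h, PySem.List.pyGetD_eq_getElem cs ' ' (by positivity) h]
      have hco : c < (cs.drop a).length := by simp; omega
      rw [List.take_add_one, List.getElem?_eq_getElem hco]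
      have hix : cs[(↑a + ↑c : Int).toNat]'(by omega) = (cs.drop a)[c] := by
        have hidx : ((↑a + ↑c : Int)).toNat = a + c := by omega
        simp only [hidx, List.getElem_drop]
      rw [hix]
      simp only [Option.toList_some, List.map_append, List.sum_append, List.map_cons,
        List.map_nil, List.sum_cons, List.sum_nil]
      ring
    · have hge : cs.length ≤ a + c := by omega
      rw [if_neg h]
      have h1 : (cs.drop a).length ≤ c := by simp [List.length_drop]; omega
      rw [List.take_of_length_le h1, List.take_of_length_le (le_trans h1 (Nat.le_succ c))]

lemma pvSegSumInt (cs : List Char) (a : Nat) (ci : Int) (acc : Int) :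
    (PySem.List.pyRange 0 ci 1).foldl
      (fun acc j => if (a : Int) + j < (cs.length : Int) then
          acc + ((PySem.List.pyGetD cs ((a : Int) + j) ' ').toNat : Int) else acc) acc
    = acc + (((cs.drop a).take ci.toNat).map (fun ch => (ch.toNat : Int))).sum := by
  by_cases h : 0 ≤ ci
  · obtain ⟨c, rfl⟩ : ∃ c : Nat, ci = (c : Int) := ⟨ci.toNat, (Int.toNat_of_nonneg h).symm⟩
    simpa using pvSegSum cs a c acc
  · rw [PySem.List.pyRange_one_eq_nil (by omega)]
    simp [Int.toNat_of_nonpos (by omega : ci ≤ 0)]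

-- the Int ord-sum of a segment is the cast of the Nat ord-sum
lemma pvCastSum (l : List Char) : (l.map (fun ch => (ch.toNat : Int))).sum = ((l.map Char.toNat).sum : Int) := by
  rw [Nat.cast_list_sum, List.map_map]; rfl

-- TABLE[(N*8) % 64] = REDUCED[N % 8]
lemma pvChar (N : Nat) :
    PySem.List.pyGetD pvTABLE (PySem.Int.mod ((N : Int) * 8) 64) ' ' = pvREDUCED.getD (N % 8) ' ' := by
  have h : ((N : Int) * 8) = ((N * 8 : Nat) : Int) := by push_cast; ring
  rw [h, show PySem.Int.mod ((N * 8 : Nat) : Int) 64 = (((N * 8) % 64 : Nat) : Int) from by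
    exact_mod_cast PySem.Int.mod_natCast (N * 8) 64, PySem.List.pyGetD_natCast]
  have h2 : (N * 8) % 64 = (N % 8) * 8 := by omega
  rw [h2]
  have h3 : N % 8 < 8 := Nat.mod_lt _ (by norm_num)
  set r := N % 8 with hr
  interval_cases r <;> rfl

-- bucket value of an index inside segment i < 10
lemma pvBucket_eq (s i j : Nat) (hi : i < 10) (h1 : i * s ≤ j) (h2 : j < i * s + s) :
    (if s = 0 then 10 else min (j / s) 10) = i := by
  have hs : 0 < s := by omega
  rw [if_neg (by omega)]
  have hji : j / s = i := by
    have hlt : j / s < i + 1 := (Nat.div_lt_iff_lt_mul hs).2 (by rw [Nat.succ_mul]; omega)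
    have hge : i ≤ j / s := (Nat.le_div_iff_mul_le hs).2 h1
    omega
  rw [hji]; omega

lemma pvBucket_ge (s j : Nat) (h : 10 * s ≤ j) :
    (if s = 0 then 10 else min (j / s) 10) = 10 := by
  by_cases hs : s = 0
  · rw [if_pos hs]
  · rw [if_neg hs]
    have : 10 ≤ j / s := (Nat.le_div_iff_mul_le (by omega)).2 (by omega)
    omega

-- every index produced by block i < 10 has bucket i
lemma pvHB (cs : List Char) (s i : Nat) (hi : i < 10) :
    ∀ p ∈ ((cs.drop (i * s)).take s).zipIdx (i * s),
      (if s = 0 then 10 else min (p.2 / s) 10) = i := by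
  rintro ⟨c, j⟩ hp
  obtain ⟨h1, h2, -⟩ := List.mem_zipIdx hp
  have hl : ((cs.drop (i * s)).take s).length ≤ s := by
    simp
  exact pvBucket_eq s i j hi h1 (by omega)

lemma pvHBlast (cs : List Char) (s : Nat) :
    ∀ p ∈ (cs.drop (10 * s)).zipIdx (10 * s),
      (if s = 0 then 10 else min (p.2 / s) 10) = 10 := by
  rintro ⟨c, j⟩ hp
  obtain ⟨h1, -, -⟩ := List.mem_zipIdx hp
  exact pvBucket_ge s j h1

-- the ord-sum of a block is the ord-sum of its characters
lemma pvZipSum (l : List Char) (n : Nat) :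
    ((l.zipIdx n).map (fun p => p.1.toNat)).sum = (l.map Char.toNat).sum := by
  rw [show (fun p : Char × Nat => p.1.toNat) = (Char.toNat ∘ Prod.fst) from rfl,
      ← List.map_map, List.zipIdx_map_fst]

-- a block whose indices all fall in bucket i folds to a single bucket update
lemma pvBlockFold (s i : Nat) (bl : List (Char × Nat)) (acc : List Nat)
    (hb : ∀ p ∈ bl, (if s = 0 then 10 else min (p.2 / s) 10) = i)
    (hi : i < acc.length) :
    bl.foldl (pvStep s) acc = acc.set i (acc.getD i 0 + (bl.map (fun p => p.1.toNat)).sum) := by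
  induction bl generalizing acc with
  | nil =>
    simp only [List.foldl_nil, List.map_nil, List.sum_nil, Nat.add_zero]
    rw [List.getD_eq_getElem acc 0 hi, List.set_getElem_self]
  | cons p t ih =>
    have hbp := hb p (by simp)
    have hbt : ∀ q ∈ t, (if s = 0 then 10 else min (q.2 / s) 10) = i :=
      fun q hq => hb q (by simp [hq])
    simp only [List.foldl_cons, pvStep, hbp]
    rw [ih _ hbt (by simpa using hi), List.set_set]
    congr 1
    rw [List.getD_eq_getElem _ 0 (by simpa using hi), List.getElem_set_self (by simpa using hi),
        List.getD_eq_getElem acc 0 hi]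
    simp [Nat.add_assoc]

-- zipIdx of a suffix splits off its first k indices
lemma pvSplit (cs : List Char) (a k : Nat) (h : a + k ≤ cs.length) :
    (cs.drop a).zipIdx a = ((cs.drop a).take k).zipIdx a ++ (cs.drop (a + k)).zipIdx (a + k) := by
  conv_lhs => rw [← List.take_append_drop k (cs.drop a)]
  rw [List.zipIdx_append, List.drop_drop, List.length_take]
  have : min k (cs.drop a).length = k := by simp [List.length_drop]; omega
  rw [this]

-- zipIdx splits into m blocks of width s plus the remainder
lemma pvSplitN (cs : List Char) (s m : Nat) (h : m * s ≤ cs.length) :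
    cs.zipIdx 0 = ((List.range m).map (fun i => ((cs.drop (i * s)).take s).zipIdx (i * s))).flatten
      ++ (cs.drop (m * s)).zipIdx (m * s) := by
  induction m with
  | zero => simp
  | succ m ih =>
    rw [ih (by nlinarith), List.range_succ, List.map_append, List.flatten_append,
        List.append_assoc]
    congr 1
    have hms : m * s + s ≤ cs.length := by
      have : (m + 1) * s = m * s + s := by ring
      omega
    rw [pvSplit cs (m * s) s hms]
    have : m * s + s = (m + 1) * s := by ring
    simp [this]

theorem get_key_salt_spec : Claim_equal_get_key_salt := by
  intro key _
  unfold Spec_get_key_salt get_key_salt get_key_salt_alt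
  generalize key.toList = cs
  -- A side: reduce to 11 explicit segment characters
  rw [show PySem.List.pyRange 0 11 1 = [0,1,2,3,4,5,6,7,8,9,10] from by decide]
  simp only [List.foldl_cons, List.foldl_nil]
  simp only [Int.reduceSub, Int.reduceEq, reduceIte]
  have hdiv : PySem.Int.floordiv (↑cs.length) 11 = ((cs.length / 11 : Nat) : Int) := by
    exact_mod_cast PySem.Int.floordiv_natCast cs.length 11
  have hmod : PySem.Int.mod (↑cs.length) 11 = ((cs.length % 11 : Nat) : Int) := by
    exact_mod_cast PySem.Int.mod_natCast cs.length 11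
  simp only [hdiv, hmod]
  norm_cast
  simp only [pvSegSumInt]
  have hlast : List.take (cs.length / 11 + cs.length % 11) (List.drop (10 * (cs.length / 11)) cs)
      = List.drop (10 * (cs.length / 11)) cs :=
    List.take_of_length_le (by simp [List.length_drop]; omega)
  -- B side: split the single pass into the 11 segment blocks and fold each block
  rw [pvSplitN cs (cs.length / 11) 10 (by omega)]
  rw [show List.range 10 = [0,1,2,3,4,5,6,7,8,9] from by decide]
  simp only [List.map_cons, List.map_nil, List.flatten_cons, List.flatten_nil,
    List.append_nil, List.foldl_append]
  rw [pvBlockFold _ 0 _ _ (pvHB cs _ 0 (by norm_num)) (by simp),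
      pvBlockFold _ 1 _ _ (pvHB cs _ 1 (by norm_num)) (by simp),
      pvBlockFold _ 2 _ _ (pvHB cs _ 2 (by norm_num)) (by simp),
      pvBlockFold _ 3 _ _ (pvHB cs _ 3 (by norm_num)) (by simp),
      pvBlockFold _ 4 _ _ (pvHB cs _ 4 (by norm_num)) (by simp),
      pvBlockFold _ 5 _ _ (pvHB cs _ 5 (by norm_num)) (by simp),
      pvBlockFold _ 6 _ _ (pvHB cs _ 6 (by norm_num)) (by simp),
      pvBlockFold _ 7 _ _ (pvHB cs _ 7 (by norm_num)) (by simp),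
      pvBlockFold _ 8 _ _ (pvHB cs _ 8 (by norm_num)) (by simp),
      pvBlockFold _ 9 _ _ (pvHB cs _ 9 (by norm_num)) (by simp),
      pvBlockFold _ 10 _ _ (pvHBlast cs _) (by simp)]
  -- evaluate the bucket list and align the two sides character by character
  simp only [pvZipSum]
  simp only [List.replicate, List.set_cons_zero, List.set_cons_succ,
    List.getD_cons_zero, List.getD_cons_succ, Nat.zero_add]
  simp only [Int.toNat_natCast, hlast, Nat.zero_mul, Nat.one_mul, List.drop_zero, zero_add,
    List.map_cons, List.map_nil, List.nil_append, List.cons_append,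
    show ("".toList : List Char) = [] from rfl]
  simp only [pvCastSum, pvChar]
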